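-- pv_equiv track=rewrite | github.com/ChristianoBraga/formal_languages | cfg_simp/cfg_simp.py | remove_prod_replace_var
-- ===== SOURCE A (Python) =====
-- def remove_prod_replace_var(p, v_set, clos):
--     p1 = { a : [] for a in p }
--     for a in p:
--         for alpha in p[a]:
--             if len(alpha) > 1 or (len(alpha) == 1 and alpha[0] not in v_set):
--                 p1[a].append(alpha)
--             else:
--                 continue
--     for a in v_set:
--         for b in clos[a]:
--             if b in p.keys():
--                 for alpha in p[b]:
--                     if len(alpha) > 1 or (len(alpha) == 1 and
--                                           alpha[0] not in v_set):
--                         p1[a].append(alpha)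
--     return p1
-- ===== SOURCE B (Python) =====
-- def remove_prod_replace_var(p, v_set, clos):
--     # One filtering pass builds a table; the closure pass then only looks it up.
--     filtered = {b: [alpha for alpha in p[b]
--                     if len(alpha) > 1 or (len(alpha) == 1 and alpha[0] not in v_set)]
--                 for b in p}
--     p1 = {a: list(filtered[a]) for a in p}
--     for a in v_set:
--         for b in clos[a]:
--             fb = filtered.get(b)
--             if fb:
--                 p1[a].extend(fb)
--     return p1
-- ===== Notes on version B (the rewrite author's own statement) =====
-- stated objective: alternative
-- what changed: B filters every nonterminal's productions once into a precomputed table and replaces A's repeated re-filtering inside the closure loop by table lookups (extend with the prefiltered list), building the initial result dict from that table in one comprehension.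
import Mathlib
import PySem

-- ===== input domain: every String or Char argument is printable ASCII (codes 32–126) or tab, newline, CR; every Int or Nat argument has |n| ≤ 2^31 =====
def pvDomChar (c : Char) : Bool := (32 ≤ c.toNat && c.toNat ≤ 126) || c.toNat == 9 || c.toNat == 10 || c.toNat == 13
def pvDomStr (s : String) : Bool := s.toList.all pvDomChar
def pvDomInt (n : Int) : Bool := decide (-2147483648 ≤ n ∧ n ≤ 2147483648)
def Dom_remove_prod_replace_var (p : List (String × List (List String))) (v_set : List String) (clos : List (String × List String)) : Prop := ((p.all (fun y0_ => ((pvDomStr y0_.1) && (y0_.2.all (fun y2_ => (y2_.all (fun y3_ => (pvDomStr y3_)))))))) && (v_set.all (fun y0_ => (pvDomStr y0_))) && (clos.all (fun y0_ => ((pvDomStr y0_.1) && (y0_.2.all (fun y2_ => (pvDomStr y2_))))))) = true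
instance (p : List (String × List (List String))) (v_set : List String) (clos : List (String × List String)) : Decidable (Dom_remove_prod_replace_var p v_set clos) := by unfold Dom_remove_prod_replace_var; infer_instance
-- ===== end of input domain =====

-- B precomputes the filtered productions once into a table and replaces A's re-filtering
-- inside the closure loop by lookups (objective: alternative decomposition, same cost class).
-- The production filter 'len(alpha) > 1 or (len(alpha) == 1 and alpha[0] not in v_set)',
-- written twice in A and once in B, as one shared predicate.
def pvKeep (v_set : List String) (alpha : List String) : Bool :=
  decide (1 < alpha.length) || (alpha.length == 1 && !(v_set.contains (alpha.headD "")))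

-- ===== PORT A =====
def remove_prod_replace_var (p : List (String × List (List String))) (v_set : List String) (clos : List (String × List String)) : List (String × List (List String)) :=
  let pd : PySem.Dict String (List (List String)) := PySem.Dict.ofList p
  let closd : PySem.Dict String (List String) := PySem.Dict.ofList clos
  -- p1 = { a : [] for a in p }
  let p1 : PySem.Dict String (List (List String)) :=
    pd.keys.foldl (fun d a => d.insert a ([] : List (List String))) PySem.Dict.empty
  -- first loop: keep only productions passing the filter
  let p1 :=
    pd.keys.foldl (fun p1 a =>
      (pd.getD a []).foldl (fun p1 alpha =>
        if pvKeep v_set alpha then p1.modify a [] (· ++ [alpha]) else p1) p1) p1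
  -- second loop: for a in v_set, for b in clos[a], re-filter p[b] and append
  let p1 :=
    v_set.foldl (fun p1 a =>
      (closd.getD a []).foldl (fun p1 b =>
        if pd.contains b then
          (pd.getD b []).foldl (fun p1 alpha =>
            if pvKeep v_set alpha then p1.modify a [] (· ++ [alpha]) else p1) p1
        else p1) p1) p1
  p1.items

-- ===== PORT B =====
def remove_prod_replace_var_alt (p : List (String × List (List String))) (v_set : List String) (clos : List (String × List String)) : List (String × List (List String)) :=
  let pd : PySem.Dict String (List (List String)) := PySem.Dict.ofList p
  let closd : PySem.Dict String (List String) := PySem.Dict.ofList clos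
  -- filtered = {b: [alpha for alpha in p[b] if keep(alpha)] for b in p}
  let filtered : PySem.Dict String (List (List String)) :=
    pd.keys.foldl (fun d b => d.insert b ((pd.getD b []).filter (pvKeep v_set))) PySem.Dict.empty
  -- p1 = {a: list(filtered[a]) for a in p}
  let p1 : PySem.Dict String (List (List String)) :=
    pd.keys.foldl (fun d a => d.insert a (filtered.getD a [])) PySem.Dict.empty
  -- closure pass: only look the table up
  let p1 :=
    v_set.foldl (fun p1 a =>
      (closd.getD a []).foldl (fun p1 b =>
        let fb := filtered.getD b []
        if fb.isEmpty then p1 else p1.modify a [] (· ++ fb)) p1) p1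
  p1.items

-- ===== PRECONDITION & SPEC =====
-- Pre_ excludes exactly the inputs on which A raises KeyError: some a in v_set missing from
-- clos, or missing from p while its closure would contribute a surviving production (p1[a]).
def Pre_remove_prod_replace_var (p : List (String × List (List String))) (v_set : List String) (clos : List (String × List String)) : Prop :=
  ∀ a ∈ v_set,
    (PySem.Dict.ofList clos).contains a = true ∧
    ((PySem.Dict.ofList p).contains a = true ∨
      ∀ b ∈ (PySem.Dict.ofList clos).getD a ([] : List String),
        (PySem.Dict.ofList p).contains b = true →
          ∀ alpha ∈ (PySem.Dict.ofList p).getD b ([] : List (List String)),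
            pvKeep v_set alpha = false)
instance (p : List (String × List (List String))) (v_set : List String) (clos : List (String × List String)) : Decidable (Pre_remove_prod_replace_var p v_set clos) := by unfold Pre_remove_prod_replace_var; infer_instance
def pvWitness_remove_prod_replace_var : (List (String × List (List String))) × List String × (List (String × List String)) :=
  ([("S", [["a", "S"], ["A"], []]), ("A", [["a"]])], ["A"], [("A", ["S", "A"])])
def Spec_remove_prod_replace_var (p : List (String × List (List String))) (v_set : List String) (clos : List (String × List String)) (out : List (String × List (List String))) : Prop := out = remove_prod_replace_var_alt p v_set clos
instance (p : List (String × List (List String))) (v_set : List String) (clos : List (String × List String)) (out : List (String × List (List String))) : Decidable (Spec_remove_prod_replace_var p v_set clos out) := by unfold Spec_remove_prod_replace_var; infer_instance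

-- ===== CLAIM (what is proved, stated in full; the proofs are below) =====
def Claim_equal_remove_prod_replace_var : Prop := ∀ (p : List (String × List (List String))) (v_set : List String) (clos : List (String × List String)), Dom_remove_prod_replace_var p v_set clos → Pre_remove_prod_replace_var p v_set clos → Spec_remove_prod_replace_var p v_set clos (remove_prod_replace_var p v_set clos)

-- ===== LEMMAS AND PROOFS =====

-- A's per-symbol filtering loop, as it appears (twice) in port A.
def pvCondFold (v : List String) (a : String) (l : List (List String)) (d : PySem.Dict String (List (List String))) : PySem.Dict String (List (List String)) :=
  l.foldl (fun p1 alpha => if pvKeep v alpha then p1.modify a [] (· ++ [alpha]) else p1) d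

theorem pv_modify_modify (d : PySem.Dict String (List (List String))) (a : String)
    (f g : List (List String) → List (List String)) :
    (d.modify a [] f).modify a [] g = d.modify a [] (fun v => g (f v)) := by
  simp [PySem.Dict.modify, PySem.Dict.insert_insert_self, PySem.Dict.getD_insert_self]

theorem pv_foldl_modify_append (m : List (List String)) (a : String) :
    ∀ d : PySem.Dict String (List (List String)), m ≠ [] →
      m.foldl (fun p1 alpha => p1.modify a [] (· ++ [alpha])) d = d.modify a [] (· ++ m) := by
  induction m with
  | nil => intro d h; exact absurd rfl h
  | cons x t ih =>
    intro d _
    by_cases ht : t = []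
    · subst ht; simp [List.foldl]
    · simp only [List.foldl_cons, ih _ ht, pv_modify_modify]
      congr 1
      funext v
      simp

theorem pvCondFold_eq (v : List String) (a : String) (l : List (List String))
    (d : PySem.Dict String (List (List String))) :
    pvCondFold v a l d =
      if (l.filter (pvKeep v)).isEmpty then d
      else d.modify a [] (· ++ l.filter (pvKeep v)) := by
  have h : pvCondFold v a l d
      = (l.filter (pvKeep v)).foldl (fun p1 alpha => p1.modify a [] (· ++ [alpha])) d := by
    unfold pvCondFold
    rw [List.foldl_filter]
  rw [h]
  by_cases he : l.filter (pvKeep v) = []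
  · simp [he]
  · rw [pv_foldl_modify_append _ _ _ he]
    simp [he]


-- filtered-table characterization: items, keys and lookups of B's precomputed table
theorem pv_filtered_items (pd : PySem.Dict String (List (List String))) (v : List String)
    (hnd : pd.keys.Nodup) :
    (pd.keys.foldl (fun d b => d.insert b ((pd.getD b []).filter (pvKeep v))) PySem.Dict.empty).items
      = pd.keys.map (fun b => (b, (pd.getD b []).filter (pvKeep v))) := by
  have h := PySem.Dict.items_foldl_insert_fresh pd.keys (fun b => b)
    (fun b => (pd.getD b []).filter (pvKeep v)) PySem.Dict.empty
    (fun a _ => by simp [PySem.Dict.contains_empty]) (by simpa using hnd)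
  simpa [PySem.Dict.empty] using h

theorem pv_filtered_keys (pd : PySem.Dict String (List (List String))) (v : List String)
    (hnd : pd.keys.Nodup) :
    (pd.keys.foldl (fun d b => d.insert b ((pd.getD b []).filter (pvKeep v))) PySem.Dict.empty).keys
      = pd.keys := by
  show (pd.keys.foldl (fun d b => d.insert b ((pd.getD b []).filter (pvKeep v))) PySem.Dict.empty).items.map (fun x => x.1) = pd.keys
  rw [pv_filtered_items pd v hnd]
  simp [Function.comp_def]

theorem pv_filtered_getD (pd : PySem.Dict String (List (List String))) (v : List String)
    (hnd : pd.keys.Nodup) (b : String) :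
    (pd.keys.foldl (fun d b => d.insert b ((pd.getD b []).filter (pvKeep v))) PySem.Dict.empty).getD b []
      = if pd.contains b then (pd.getD b []).filter (pvKeep v) else [] := by
  set F := pd.keys.foldl (fun d b => d.insert b ((pd.getD b []).filter (pvKeep v))) PySem.Dict.empty with hF
  by_cases hb : pd.contains b = true
  · have hmem : b ∈ pd.keys := (PySem.Dict.contains_iff_mem_keys pd b).mp hb
    have hit : (b, (pd.getD b []).filter (pvKeep v)) ∈ F.items := by
      rw [hF, pv_filtered_items pd v hnd]
      exact List.mem_map.mpr ⟨b, hmem, rfl⟩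
    have hknd : F.keys.Nodup := by rw [hF, pv_filtered_keys pd v hnd]; exact hnd
    rw [PySem.Dict.getD_of_mem_items F hit hknd, if_pos hb]
  · have hnotmem : b ∉ pd.keys := fun h => hb ((PySem.Dict.contains_iff_mem_keys pd b).mpr h)
    have hc : F.contains b = false := by
      cases h : F.contains b
      · rfl
      · refine absurd ?_ hnotmem
        rw [← pv_filtered_keys pd v hnd, ← hF]
        exact (PySem.Dict.contains_iff_mem_keys F b).mp h
    rw [PySem.Dict.getD_of_not_contains F [] hc, if_neg hb]

-- the initial dict { a : [] for a in p }
theorem pv_init_items (pd : PySem.Dict String (List (List String))) (hnd : pd.keys.Nodup) :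
    (pd.keys.foldl (fun d a => d.insert a ([] : List (List String))) PySem.Dict.empty).items
      = pd.keys.map (fun a => (a, ([] : List (List String)))) := by
  have h := PySem.Dict.items_foldl_insert_fresh pd.keys (fun a => a)
    (fun _ => ([] : List (List String))) PySem.Dict.empty
    (fun a _ => by simp [PySem.Dict.contains_empty]) (by simpa using hnd)
  simpa [PySem.Dict.empty] using h

theorem pv_init_keys (pd : PySem.Dict String (List (List String))) (hnd : pd.keys.Nodup) :
    (pd.keys.foldl (fun d a => d.insert a ([] : List (List String))) PySem.Dict.empty).keys = pd.keys := by
  show (pd.keys.foldl (fun d a => d.insert a ([] : List (List String))) PySem.Dict.empty).items.map (fun x => x.1) = pd.keys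
  rw [pv_init_items pd hnd]
  simp [Function.comp_def]

theorem pv_init_getD (pd : PySem.Dict String (List (List String))) (hnd : pd.keys.Nodup) (x : String) :
    (pd.keys.foldl (fun d a => d.insert a ([] : List (List String))) PySem.Dict.empty).getD x [] = [] := by
  set I := pd.keys.foldl (fun d a => d.insert a ([] : List (List String))) PySem.Dict.empty with hI
  by_cases hx : I.contains x = true
  · have hmem : x ∈ I.keys := (PySem.Dict.contains_iff_mem_keys I x).mp hx
    rw [hI, pv_init_keys pd hnd] at hmem
    have hit : (x, ([] : List (List String))) ∈ I.items := by
      rw [hI, pv_init_items pd hnd]; exact List.mem_map.mpr ⟨x, hmem, rfl⟩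
    have hknd : I.keys.Nodup := by rw [hI, pv_init_keys pd hnd]; exact hnd
    exact PySem.Dict.getD_of_mem_items I hit hknd []
  · have : I.contains x = false := by
      cases h : I.contains x
      · rfl
      · exact absurd h hx
    exact PySem.Dict.getD_of_not_contains I [] this

-- one pvCondFold step on a dict that contains the key: keys, contains, getD
theorem pv_condFold_keys (v : List String) (a : String) (l : List (List String))
    (d : PySem.Dict String (List (List String))) (ha : d.contains a = true) :
    (pvCondFold v a l d).keys = d.keys := by
  rw [pvCondFold_eq]
  by_cases he : (l.filter (pvKeep v)).isEmpty = true
  · rw [if_pos he]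
  · rw [if_neg he, PySem.Dict.keys_modify, PySem.Dict.keys_insert_of_contains _ _ ha]

theorem pv_condFold_contains (v : List String) (a : String) (l : List (List String))
    (d : PySem.Dict String (List (List String))) (x : String) (hx : d.contains x = true) :
    (pvCondFold v a l d).contains x = true := by
  rw [pvCondFold_eq]
  by_cases he : (l.filter (pvKeep v)).isEmpty = true
  · rw [if_pos he]; exact hx
  · rw [if_neg he, PySem.Dict.contains_modify, hx, Bool.or_true]

theorem pv_condFold_getD (v : List String) (a : String) (l : List (List String))
    (d : PySem.Dict String (List (List String))) (x : String) :
    (pvCondFold v a l d).getD x []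
      = if x = a then d.getD a [] ++ l.filter (pvKeep v) else d.getD x [] := by
  rw [pvCondFold_eq]
  by_cases he : (l.filter (pvKeep v)).isEmpty = true
  · have hnil : l.filter (pvKeep v) = [] := by simpa [List.isEmpty_iff] using he
    rw [if_pos he, hnil]
    by_cases hx : x = a
    · subst hx; simp
    · rw [if_neg hx]
  · rw [if_neg he, PySem.Dict.getD_modify]

-- phase-1 loop characterization over any Nodup key list contained in the dict
theorem pv_phase1 (v : List String) (g : String → List (List String)) :
    ∀ (ks : List String) (d : PySem.Dict String (List (List String))), ks.Nodup →
      (∀ a ∈ ks, d.contains a = true) →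
      (ks.foldl (fun p1 a => pvCondFold v a (g a) p1) d).keys = d.keys ∧
      ∀ x, (ks.foldl (fun p1 a => pvCondFold v a (g a) p1) d).getD x []
            = d.getD x [] ++ (if x ∈ ks then (g x).filter (pvKeep v) else []) := by
  intro ks
  induction ks with
  | nil => intro d _ _; exact ⟨rfl, fun x => by simp⟩
  | cons a t ih =>
    intro d hnd hcon
    have ha : d.contains a = true := hcon a (List.mem_cons_self ..)
    have hcon' : ∀ b ∈ t, (pvCondFold v a (g a) d).contains b = true :=
      fun b hb => pv_condFold_contains v a (g a) d b (hcon b (List.mem_cons_of_mem a hb))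
    obtain ⟨hk, hg⟩ := ih (pvCondFold v a (g a) d) hnd.of_cons hcon'
    refine ⟨?_, ?_⟩
    · rw [List.foldl_cons, hk, pv_condFold_keys v a (g a) d ha]
    · intro x
      rw [List.foldl_cons, hg x, pv_condFold_getD]
      by_cases hx : x = a
      · subst hx
        have hxt : x ∉ t := (List.nodup_cons.mp hnd).1
        simp [hxt]
      · simp [hx, List.mem_cons]

-- the two phase-1 results coincide
theorem pv_phase1_eq (pd : PySem.Dict String (List (List String))) (v : List String)
    (hnd : pd.keys.Nodup) :
    (pd.keys.foldl (fun p1 a => pvCondFold v a (pd.getD a []) p1)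
        (pd.keys.foldl (fun d a => d.insert a ([] : List (List String))) PySem.Dict.empty))
      = pd.keys.foldl (fun d a => d.insert a
          ((pd.keys.foldl (fun d b => d.insert b ((pd.getD b []).filter (pvKeep v))) PySem.Dict.empty).getD a []))
          PySem.Dict.empty := by
  set I := pd.keys.foldl (fun d a => d.insert a ([] : List (List String))) PySem.Dict.empty with hI
  have hIcon : ∀ a ∈ pd.keys, I.contains a = true := by
    intro a hmem
    exact (PySem.Dict.contains_iff_mem_keys I a).mpr (by rw [hI, pv_init_keys pd hnd]; exact hmem)
  obtain ⟨hk, hg⟩ := pv_phase1 v (fun a => pd.getD a []) pd.keys I hnd hIcon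
  apply PySem.Dict.ext
  set A1 := pd.keys.foldl (fun p1 a => pvCondFold v a (pd.getD a []) p1) I with hA1
  have hA1keys : A1.keys = pd.keys := by rw [hA1, hk, hI, pv_init_keys pd hnd]
  have hA1items : A1.items = pd.keys.map (fun k => (k, (pd.getD k []).filter (pvKeep v))) := by
    rw [PySem.Dict.items_eq_map_keys A1 (by rw [hA1keys]; exact hnd) [], hA1keys]
    apply List.map_congr_left
    intro k hkmem
    dsimp only
    have := hg k
    rw [hI, pv_init_getD pd hnd k] at this
    rw [hA1] at this ⊢
    rw [this, if_pos hkmem, List.nil_append]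
  have hBitems : (pd.keys.foldl (fun d a => d.insert a
      ((pd.keys.foldl (fun d b => d.insert b ((pd.getD b []).filter (pvKeep v))) PySem.Dict.empty).getD a []))
      PySem.Dict.empty).items
      = pd.keys.map (fun k => (k, (pd.getD k []).filter (pvKeep v))) := by
    have h := PySem.Dict.items_foldl_insert_fresh pd.keys (fun a => a)
      (fun a => (pd.keys.foldl (fun d b => d.insert b ((pd.getD b []).filter (pvKeep v))) PySem.Dict.empty).getD a [])
      PySem.Dict.empty (fun a _ => by simp [PySem.Dict.contains_empty]) (by simpa using hnd)
    rw [show (PySem.Dict.empty : PySem.Dict String (List (List String))).items = [] from rfl] at h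
    rw [h, List.nil_append]
    apply List.map_congr_left
    intro k hkmem
    dsimp only
    rw [pv_filtered_getD pd v hnd k, if_pos ((PySem.Dict.contains_iff_mem_keys pd k).mpr hkmem)]
  rw [hA1items, hBitems]

theorem remove_prod_replace_var_spec_aux (p : List (String × List (List String))) (v_set : List String) (clos : List (String × List String)) :
    remove_prod_replace_var p v_set clos = remove_prod_replace_var_alt p v_set clos := by
  unfold remove_prod_replace_var remove_prod_replace_var_alt
  set pd := PySem.Dict.ofList p with hpd
  set closd := PySem.Dict.ofList clos with hclosd
  have hnd : pd.keys.Nodup := PySem.Dict.nodup_keys_ofList p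
  have h1 : (pd.keys.foldl (fun p1 a =>
        (pd.getD a []).foldl (fun p1 alpha =>
          if pvKeep v_set alpha then p1.modify a [] (· ++ [alpha]) else p1) p1)
        (pd.keys.foldl (fun d a => d.insert a ([] : List (List String))) PySem.Dict.empty))
      = pd.keys.foldl (fun d a => d.insert a
          ((pd.keys.foldl (fun d b => d.insert b ((pd.getD b []).filter (pvKeep v_set))) PySem.Dict.empty).getD a []))
          PySem.Dict.empty := pv_phase1_eq pd v_set hnd
  have hstep : (fun (p1 : PySem.Dict String (List (List String))) (a : String) =>
        (closd.getD a []).foldl (fun p1 b =>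
          if pd.contains b then
            (pd.getD b []).foldl (fun p1 alpha =>
              if pvKeep v_set alpha then p1.modify a [] (· ++ [alpha]) else p1) p1
          else p1) p1)
      = (fun (p1 : PySem.Dict String (List (List String))) (a : String) =>
        (closd.getD a []).foldl (fun p1 b =>
          let fb := (pd.keys.foldl (fun d b => d.insert b ((pd.getD b []).filter (pvKeep v_set))) PySem.Dict.empty).getD b []
          if fb.isEmpty then p1 else p1.modify a [] (· ++ fb)) p1) := by
    funext p1 a
    apply PySem.List.foldl_congr_mem
    intro d b _
    show (if pd.contains b then pvCondFold v_set a (pd.getD b []) d else d) = _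
    by_cases hb : pd.contains b = true
    · rw [if_pos hb, pv_filtered_getD pd v_set hnd b, if_pos hb, pvCondFold_eq]
    · have hb' : pd.contains b = false := by simpa using hb
      rw [if_neg hb, pv_filtered_getD pd v_set hnd b, if_neg hb]
      simp
  simp only [h1, hstep]

-- ===== VERDICT (by name: the statement is the Claim_ definition above) =====
theorem remove_prod_replace_var_spec : Claim_equal_remove_prod_replace_var := by
  intro p v_set clos _ _
  exact remove_prod_replace_var_spec_aux p v_set clos
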